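-- pv_equiv track=rewrite | github.com/yamaha-network/ansible-collection-rtx | ansible_collections/yamaha_network/rtx/plugins/module_utils/network/rtx/rtx.py | update_console_info
-- ===== SOURCE A (Python) =====
-- def update_console_info(commands, console_info):
--
--     character = [c_char for c_char in commands if 'console character' in c_char]
--     if character:
--         console_info['character'] = character[0]
--
--     lines = [c_lines for c_lines in commands if 'console lines' in c_lines]
--     if lines:
--         console_info['lines'] = lines[0]
--
--     columns = [c_columns for c_columns in commands if 'console columns' in c_columns]
--     if columns:
--         console_info['columns'] = columns[0]
--
--     return console_info
-- ===== SOURCE B (Python) =====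
-- def update_console_info(commands, console_info):
--     character = lines = columns = None
--     for c in commands:
--         if character is None and 'console character' in c:
--             character = c
--         if lines is None and 'console lines' in c:
--             lines = c
--         if columns is None and 'console columns' in c:
--             columns = c
--     if character is not None:
--         console_info['character'] = character
--     if lines is not None:
--         console_info['lines'] = lines
--     if columns is not None:
--         console_info['columns'] = columns
--     return console_info
-- ===== Notes on version B (the rewrite author's own statement) =====
-- stated objective: simpler
-- what changed: Replaces the three separate filter-comprehensions (three full passes building intermediate lists) with a single pass over commands that records the first match for each key in local variables, then writes them into the dict.
import Mathlib
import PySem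

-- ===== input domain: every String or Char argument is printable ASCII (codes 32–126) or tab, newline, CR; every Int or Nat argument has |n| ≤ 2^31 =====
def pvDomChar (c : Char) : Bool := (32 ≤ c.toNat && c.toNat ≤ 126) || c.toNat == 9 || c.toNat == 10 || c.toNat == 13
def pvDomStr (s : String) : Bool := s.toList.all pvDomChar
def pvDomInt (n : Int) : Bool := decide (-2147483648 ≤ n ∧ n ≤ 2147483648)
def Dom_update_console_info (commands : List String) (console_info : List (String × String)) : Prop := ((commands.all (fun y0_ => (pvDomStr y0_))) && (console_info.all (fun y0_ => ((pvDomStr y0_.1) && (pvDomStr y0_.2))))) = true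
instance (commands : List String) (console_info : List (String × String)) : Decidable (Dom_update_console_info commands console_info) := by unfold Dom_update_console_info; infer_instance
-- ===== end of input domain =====

-- B: one pass over commands capturing the first match per key, instead of A's three filter passes (objective: simpler).
-- NOTE: the Python A mutates console_info in place; the equivalence proved here is about the return value (B mutates it the same way).
-- ===== PORT A =====
def update_console_info (commands : List String) (console_info : List (String × String)) : List (String × String) :=
  let d : PySem.Dict String String := ⟨console_info⟩
  let character := commands.filter (fun c => PySem.Str.isIn "console character" c)
  let d := match character with
    | x :: _ => PySem.Dict.insert d "character" x
    | [] => d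
  let lines := commands.filter (fun c => PySem.Str.isIn "console lines" c)
  let d := match lines with
    | x :: _ => PySem.Dict.insert d "lines" x
    | [] => d
  let columns := commands.filter (fun c => PySem.Str.isIn "console columns" c)
  let d := match columns with
    | x :: _ => PySem.Dict.insert d "columns" x
    | [] => d
  d.items

-- ===== PORT B =====
def update_console_info_altStep (st : Option String × Option String × Option String) (c : String) :
    Option String × Option String × Option String :=
  let ch := if st.1.isNone && PySem.Str.isIn "console character" c then some c else st.1
  let ln := if st.2.1.isNone && PySem.Str.isIn "console lines" c then some c else st.2.1
  let co := if st.2.2.isNone && PySem.Str.isIn "console columns" c then some c else st.2.2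
  (ch, ln, co)

def update_console_info_alt (commands : List String) (console_info : List (String × String)) : List (String × String) :=
  let st := commands.foldl update_console_info_altStep (none, none, none)
  let d : PySem.Dict String String := ⟨console_info⟩
  let d := match st.1 with
    | some x => PySem.Dict.insert d "character" x
    | none => d
  let d := match st.2.1 with
    | some x => PySem.Dict.insert d "lines" x
    | none => d
  let d := match st.2.2 with
    | some x => PySem.Dict.insert d "columns" x
    | none => d
  d.items

-- ===== PRECONDITION & SPEC =====
def Spec_update_console_info (commands : List String) (console_info : List (String × String)) (out : List (String × String)) : Prop := out = update_console_info_alt commands console_info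
instance (commands : List String) (console_info : List (String × String)) (out : List (String × String)) : Decidable (Spec_update_console_info commands console_info out) := by unfold Spec_update_console_info; infer_instance

-- ===== CLAIM (what is proved, stated in full; the proofs are below) =====
def Claim_equal_update_console_info : Prop := ∀ (commands : List String) (console_info : List (String × String)), Dom_update_console_info commands console_info → Spec_update_console_info commands console_info (update_console_info commands console_info)

-- ===== LEMMAS AND PROOFS =====

theorem altStep_fold (cmds : List String) (ch ln co : Option String) :
    cmds.foldl update_console_info_altStep (ch, ln, co) =
      (ch.or (cmds.find? (fun c => PySem.Str.isIn "console character" c)),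
       ln.or (cmds.find? (fun c => PySem.Str.isIn "console lines" c)),
       co.or (cmds.find? (fun c => PySem.Str.isIn "console columns" c))) := by
  induction cmds generalizing ch ln co with
  | nil => simp
  | cons c cs ih =>
    simp only [List.foldl_cons, update_console_info_altStep, ih]
    cases h1 : PySem.Str.isIn "console character" c <;>
    cases h2 : PySem.Str.isIn "console lines" c <;>
    cases h3 : PySem.Str.isIn "console columns" c <;>
    cases ch <;> cases ln <;> cases co <;>
      simp_all

theorem head?_filter_eq_find? (p : String → Bool) (cmds : List String) :
    (cmds.filter p).head? = cmds.find? p := by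
  induction cmds with
  | nil => rfl
  | cons c cs ih =>
    by_cases h : p c <;> simp [h, ih]

-- ===== VERDICT (by name: the statement is the Claim_ definition above) =====
theorem update_console_info_spec : Claim_equal_update_console_info := by
  unfold Claim_equal_update_console_info
  intro commands console_info _
  unfold Spec_update_console_info update_console_info update_console_info_alt
  rw [altStep_fold]
  simp only [Option.none_or]
  rw [← head?_filter_eq_find? (fun c => PySem.Str.isIn "console character" c) commands,
      ← head?_filter_eq_find? (fun c => PySem.Str.isIn "console lines" c) commands,
      ← head?_filter_eq_find? (fun c => PySem.Str.isIn "console columns" c) commands]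
  cases (commands.filter (fun c => PySem.Str.isIn "console character" c)) <;>
  cases (commands.filter (fun c => PySem.Str.isIn "console lines" c)) <;>
  cases (commands.filter (fun c => PySem.Str.isIn "console columns" c)) <;> rfl
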